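-- pv_equiv track=rewrite | github.com/zning1994-agent/ai-readable-doc-generator | src/ai_readable_doc_generator/parser/plugins/semantic_tagger.py | _calculate_importance_markers
-- ===== SOURCE A (Python) =====
-- from typing import Any, Dict, List, Optional, Set
--
-- def _calculate_importance_markers(parsed: Dict[str, Any]) -> Dict[str, Any]:
--     """
--     Calculate overall importance markers for the document.
--
--     Args:
--         parsed: The parsed document dictionary.
--
--     Returns:
--         Dictionary of importance markers.
--     """
--     markers: Dict[str, Any] = {
--         "has_critical": False,
--         "has_important": False,
--         "has_instructions": False,
--         "has_configuration": False,
--         "has_api_reference": False,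
--         "has_errors": False,
--     }
--
--     # Check sections
--     for section in parsed.get("sections", []):
--         tags = section.get("semantic_tags", {})
--         importance = tags.get("importance", "normal")
--         content_type = tags.get("content_type", "")
--
--         if importance == "critical":
--             markers["has_critical"] = True
--         if importance == "important":
--             markers["has_important"] = True
--         if content_type == "instruction":
--             markers["has_instructions"] = True
--         if content_type == "configuration":
--             markers["has_configuration"] = True
--         if content_type == "api_reference":
--             markers["has_api_reference"] = True
--         if content_type == "error_reference":
--             markers["has_errors"] = True
--
--     return markers
-- ===== SOURCE B (Python) =====
-- def _calculate_importance_markers(parsed):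
--     """
--     Calculate overall importance markers for the document.
--
--     Re-implementation: builds the result dict directly, one any(...) scan
--     per flag, instead of a single flag-accumulating loop.
--     """
--     sections = parsed.get("sections", [])
--
--     def _imp(section):
--         return section.get("semantic_tags", {}).get("importance", "normal")
--
--     def _ct(section):
--         return section.get("semantic_tags", {}).get("content_type", "")
--
--     return {
--         "has_critical": any(_imp(s) == "critical" for s in sections),
--         "has_important": any(_imp(s) == "important" for s in sections),
--         "has_instructions": any(_ct(s) == "instruction" for s in sections),
--         "has_configuration": any(_ct(s) == "configuration" for s in sections),
--         "has_api_reference": any(_ct(s) == "api_reference" for s in sections),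
--         "has_errors": any(_ct(s) == "error_reference" for s in sections),
--     }
-- ===== Notes on version B (the rewrite author's own statement) =====
-- stated objective: idiomatic
-- what changed: Replaces the single loop that mutates six flags in a markers dict with a dict literal built from six independent any(...) scans over the sections.
import Mathlib
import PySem

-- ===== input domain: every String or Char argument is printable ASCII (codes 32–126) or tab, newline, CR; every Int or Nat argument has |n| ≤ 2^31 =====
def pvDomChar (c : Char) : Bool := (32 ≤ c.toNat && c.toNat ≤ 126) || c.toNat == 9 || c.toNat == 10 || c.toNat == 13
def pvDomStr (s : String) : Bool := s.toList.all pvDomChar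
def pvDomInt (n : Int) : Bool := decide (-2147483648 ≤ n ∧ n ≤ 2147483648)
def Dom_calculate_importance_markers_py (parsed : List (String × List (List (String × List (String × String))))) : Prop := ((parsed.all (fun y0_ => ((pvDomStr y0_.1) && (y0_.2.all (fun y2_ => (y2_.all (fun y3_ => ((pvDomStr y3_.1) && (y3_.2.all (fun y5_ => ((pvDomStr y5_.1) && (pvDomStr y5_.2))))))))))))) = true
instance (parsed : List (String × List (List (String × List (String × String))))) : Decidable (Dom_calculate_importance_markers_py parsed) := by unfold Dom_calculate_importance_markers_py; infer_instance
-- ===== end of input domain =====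

-- B builds the markers dict directly with one any(...) scan per flag instead of A's
-- single loop mutating six flags; same cost, more idiomatic.

-- ===== PORT A =====
-- the body of A's loop: update the markers dict from one section
def pvStepA (m : PySem.Dict String Bool) (section_ : List (String × List (String × String))) : PySem.Dict String Bool :=
  let tags := (PySem.Dict.mk section_).getD "semantic_tags" []
  let importance := (PySem.Dict.mk tags).getD "importance" "normal"
  let content_type := (PySem.Dict.mk tags).getD "content_type" ""
  let m := if importance == "critical" then m.insert "has_critical" true else m
  let m := if importance == "important" then m.insert "has_important" true else m
  let m := if content_type == "instruction" then m.insert "has_instructions" true else m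
  let m := if content_type == "configuration" then m.insert "has_configuration" true else m
  let m := if content_type == "api_reference" then m.insert "has_api_reference" true else m
  let m := if content_type == "error_reference" then m.insert "has_errors" true else m
  m

def calculate_importance_markers_py (parsed : List (String × List (List (String × List (String × String))))) : List (String × Bool) :=
  let markers : PySem.Dict String Bool :=
    PySem.Dict.ofList [("has_critical", false), ("has_important", false),
      ("has_instructions", false), ("has_configuration", false),
      ("has_api_reference", false), ("has_errors", false)]
  let sections := (PySem.Dict.mk parsed).getD "sections" []
  (sections.foldl pvStepA markers).items

-- ===== PORT B =====
def pvImp (section_ : List (String × List (String × String))) : String :=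
  (PySem.Dict.mk ((PySem.Dict.mk section_).getD "semantic_tags" [])).getD "importance" "normal"

def pvCt (section_ : List (String × List (String × String))) : String :=
  (PySem.Dict.mk ((PySem.Dict.mk section_).getD "semantic_tags" [])).getD "content_type" ""

def calculate_importance_markers_py_alt (parsed : List (String × List (List (String × List (String × String))))) : List (String × Bool) :=
  let sections := (PySem.Dict.mk parsed).getD "sections" []
  [("has_critical", sections.any (fun s => pvImp s == "critical")),
   ("has_important", sections.any (fun s => pvImp s == "important")),
   ("has_instructions", sections.any (fun s => pvCt s == "instruction")),
   ("has_configuration", sections.any (fun s => pvCt s == "configuration")),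
   ("has_api_reference", sections.any (fun s => pvCt s == "api_reference")),
   ("has_errors", sections.any (fun s => pvCt s == "error_reference"))]

-- ===== PRECONDITION & SPEC =====
def Spec_calculate_importance_markers_py (parsed : List (String × List (List (String × List (String × String))))) (out : List (String × Bool)) : Prop := out = calculate_importance_markers_py_alt parsed
instance (parsed : List (String × List (List (String × List (String × String))))) (out : List (String × Bool)) : Decidable (Spec_calculate_importance_markers_py parsed out) := by unfold Spec_calculate_importance_markers_py; infer_instance

-- ===== CLAIM (what is proved, stated in full; the proofs are below) =====
def Claim_equal_calculate_importance_markers_py : Prop := ∀ (parsed : List (String × List (List (String × List (String × String))))), Dom_calculate_importance_markers_py parsed → Spec_calculate_importance_markers_py parsed (calculate_importance_markers_py parsed)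

-- ===== LEMMAS AND PROOFS =====

-- the six-flag markers dict (its shape is invariant under pvStepA)
def pvSix (c i n f a e : Bool) : PySem.Dict String Bool :=
  PySem.Dict.mk [("has_critical", c), ("has_important", i), ("has_instructions", n),
    ("has_configuration", f), ("has_api_reference", a), ("has_errors", e)]

lemma pvIns1 (c i n f a e : Bool) : (pvSix c i n f a e).insert "has_critical" true = pvSix true i n f a e := rfl
lemma pvIns2 (c i n f a e : Bool) : (pvSix c i n f a e).insert "has_important" true = pvSix c true n f a e := rfl
lemma pvIns3 (c i n f a e : Bool) : (pvSix c i n f a e).insert "has_instructions" true = pvSix c i true f a e := rfl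
lemma pvIns4 (c i n f a e : Bool) : (pvSix c i n f a e).insert "has_configuration" true = pvSix c i n true a e := rfl
lemma pvIns5 (c i n f a e : Bool) : (pvSix c i n f a e).insert "has_api_reference" true = pvSix c i n f true e := rfl
lemma pvIns6 (c i n f a e : Bool) : (pvSix c i n f a e).insert "has_errors" true = pvSix c i n f a true := rfl

lemma pvStepA_six (c i n f a e : Bool) (s : List (String × List (String × String))) :
    pvStepA (pvSix c i n f a e) s =
      pvSix (c || (pvImp s == "critical")) (i || (pvImp s == "important"))
        (n || (pvCt s == "instruction")) (f || (pvCt s == "configuration"))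
        (a || (pvCt s == "api_reference")) (e || (pvCt s == "error_reference")) := by
  show (let tags := (PySem.Dict.mk s).getD "semantic_tags" []
    let importance := (PySem.Dict.mk tags).getD "importance" "normal"
    let content_type := (PySem.Dict.mk tags).getD "content_type" ""
    let m := if importance == "critical" then (pvSix c i n f a e).insert "has_critical" true else pvSix c i n f a e
    let m := if importance == "important" then m.insert "has_important" true else m
    let m := if content_type == "instruction" then m.insert "has_instructions" true else m
    let m := if content_type == "configuration" then m.insert "has_configuration" true else m
    let m := if content_type == "api_reference" then m.insert "has_api_reference" true else m
    let m := if content_type == "error_reference" then m.insert "has_errors" true else m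
    m) = _
  simp only [pvImp, pvCt]
  cases h1 : ((PySem.Dict.mk ((PySem.Dict.mk s).getD "semantic_tags" [])).getD "importance" "normal" == "critical") <;>
  cases h2 : ((PySem.Dict.mk ((PySem.Dict.mk s).getD "semantic_tags" [])).getD "importance" "normal" == "important") <;>
  cases h3 : ((PySem.Dict.mk ((PySem.Dict.mk s).getD "semantic_tags" [])).getD "content_type" "" == "instruction") <;>
  cases h4 : ((PySem.Dict.mk ((PySem.Dict.mk s).getD "semantic_tags" [])).getD "content_type" "" == "configuration") <;>
  cases h5 : ((PySem.Dict.mk ((PySem.Dict.mk s).getD "semantic_tags" [])).getD "content_type" "" == "api_reference") <;>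
  cases h6 : ((PySem.Dict.mk ((PySem.Dict.mk s).getD "semantic_tags" [])).getD "content_type" "" == "error_reference") <;>
  simp [h1, h2, h3, h4, pvIns1, pvIns2, pvIns3, pvIns4, pvIns5, pvIns6]

lemma pvFoldA (secs : List (List (String × List (String × String)))) :
    ∀ (c i n f a e : Bool),
    secs.foldl pvStepA (pvSix c i n f a e) =
      pvSix (c || secs.any (fun s => pvImp s == "critical")) (i || secs.any (fun s => pvImp s == "important"))
        (n || secs.any (fun s => pvCt s == "instruction")) (f || secs.any (fun s => pvCt s == "configuration"))
        (a || secs.any (fun s => pvCt s == "api_reference")) (e || secs.any (fun s => pvCt s == "error_reference")) := by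
  induction secs with
  | nil => simp
  | cons s rest ih =>
    intro c i n f a e
    simp only [List.foldl_cons, pvStepA_six, ih, List.any_cons, Bool.or_assoc]

-- ===== VERDICT (by name: the statement is the Claim_ definition above) =====
theorem calculate_importance_markers_py_spec : Claim_equal_calculate_importance_markers_py := by
  intro parsed _
  show calculate_importance_markers_py parsed = calculate_importance_markers_py_alt parsed
  unfold calculate_importance_markers_py calculate_importance_markers_py_alt
  have : PySem.Dict.ofList
      [("has_critical", false), ("has_important", false), ("has_instructions", false),
       ("has_configuration", false), ("has_api_reference", false), ("has_errors", false)] =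
      pvSix false false false false false false := rfl
  simp only [this, pvFoldA, Bool.false_or]
  simp [pvSix]
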